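-- pv_equiv track=rewrite | github.com/Nakyung-Lee/Algorithm | level1/폰켄몬_me.py | solution
-- ===== SOURCE A (Python) =====
-- def solution(nums):
--     answer = 0
--     a=len(nums)//2
--     nums=set(nums)
--     for i in range (len(nums)):
--         if answer<a:
--             answer+=1
--     return answer
-- ===== SOURCE B (Python) =====
-- def solution(nums):
--     return min(len(set(nums)), len(nums) // 2)
-- ===== Notes on version B (the rewrite author's own statement) =====
-- stated objective: simpler
-- what changed: Replaced the counting loop over range(len(set)) with the closed form min(len(set(nums)), len(nums)//2).
import Mathlib
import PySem

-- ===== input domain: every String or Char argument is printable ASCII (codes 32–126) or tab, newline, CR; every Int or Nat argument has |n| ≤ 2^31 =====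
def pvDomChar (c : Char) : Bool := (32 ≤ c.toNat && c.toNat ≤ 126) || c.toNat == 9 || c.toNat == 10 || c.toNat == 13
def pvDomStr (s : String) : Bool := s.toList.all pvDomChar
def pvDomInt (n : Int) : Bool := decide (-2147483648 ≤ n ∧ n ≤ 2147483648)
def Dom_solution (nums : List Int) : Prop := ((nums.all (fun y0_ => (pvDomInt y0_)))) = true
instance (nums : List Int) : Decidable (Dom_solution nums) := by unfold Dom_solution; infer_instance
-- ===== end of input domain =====

-- B replaces A's counting loop with the closed form min(len(set(nums)), len(nums)//2); objective: simpler.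

-- ===== PORT A =====
def solution (nums : List Int) : Int :=
  let answer : Int := 0
  let a : Int := PySem.Int.floordiv (nums.length : Int) 2
  let s : PySem.Set Int := PySem.Set.ofList nums
  (List.range s.length).foldl (fun answer _ => if answer < a then answer + 1 else answer) answer

-- ===== PORT B =====
def solution_alt (nums : List Int) : Int :=
  min ((PySem.Set.ofList nums).length : Int) (PySem.Int.floordiv (nums.length : Int) 2)

-- ===== PRECONDITION & SPEC =====
def Spec_solution (nums : List Int) (out : Int) : Prop := out = solution_alt nums
instance (nums : List Int) (out : Int) : Decidable (Spec_solution nums out) := by unfold Spec_solution; infer_instance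

-- ===== CLAIM (what is proved, stated in full; the proofs are below) =====
def Claim_equal_solution : Prop := ∀ (nums : List Int), Dom_solution nums → Spec_solution nums (solution nums)

-- ===== LEMMAS AND PROOFS =====
theorem pv_count_loop (n : Nat) (a : Int) (ha : 0 ≤ a) :
    (List.range n).foldl (fun answer _ => if answer < a then answer + 1 else answer) 0
      = min (n : Int) a := by
  induction n with
  | zero => simp; omega
  | succ n ih =>
    rw [List.range_succ, List.foldl_append, ih]
    simp only [List.foldl_cons, List.foldl_nil]
    split_ifs with h <;> push_cast <;> omega

-- ===== VERDICT (by name: the statement is the Claim_ definition above) =====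
theorem solution_spec : Claim_equal_solution := by
  intro nums _
  unfold Spec_solution solution solution_alt
  rw [pv_count_loop]
  · rw [PySem.Int.floordiv_eq_ediv_of_pos (by omega)]
    positivity
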